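-- pv_equiv track=rewrite | github.com/joaolscosta/ist | FProg/PROJETO_1/projeto_backup2.py | validar_cifra
-- ===== SOURCE A (Python) =====
-- def validar_cifra(cifra,seq_ctrl): # 322
--     cifra_str = ""
--     for car in cifra:
--         if car != "-":
--             cifra_str += car
--     cifra_str = sorted(cifra_str)
--     dic = {}
--     for letra in cifra_str:
--         if letra not in dic: # Se o valor ainda não estive presente no dicionario
--             dic[letra] = 0   # Inicializa lo senao adicionar mais uma ocorrencia
--         if letra in dic:
--             dic[letra] += 1
--     dic = list(sorted(dic,key=dic.get,reverse = True))
--     dic = "".join(dic)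
--
--     if dic[0:5] == seq_ctrl[1:6]:
--         return True
--     else:
--         return False
-- ===== SOURCE B (Python) =====
-- def validar_cifra(cifra, seq_ctrl):
--     # One counting pass, then NO sort at all: select the (up to) five leaders by
--     # repeated argmax over the distinct keys (higher count first, smaller char on ties).
--     counts = {}
--     for c in cifra:
--         if c != "-":
--             counts[c] = counts.get(c, 0) + 1
--     top = []
--     for _ in range(5):
--         best = None
--         for ch, n in counts.items():
--             if ch not in top and (best is None or n > counts[best]
--                                   or (n == counts[best] and ch < best)):
--                 best = ch
--         if best is None:
--             break
--         top.append(best)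
--     return "".join(top) == seq_ctrl[1:6]
-- ===== Notes on version B (the rewrite author's own statement) =====
-- stated objective: faster
-- what changed: B counts characters in one pass and replaces A's two sorts entirely by at most five rounds of argmax selection over the distinct keys (higher count first, smaller character on ties), so nothing is ever sorted.
import Mathlib
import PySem

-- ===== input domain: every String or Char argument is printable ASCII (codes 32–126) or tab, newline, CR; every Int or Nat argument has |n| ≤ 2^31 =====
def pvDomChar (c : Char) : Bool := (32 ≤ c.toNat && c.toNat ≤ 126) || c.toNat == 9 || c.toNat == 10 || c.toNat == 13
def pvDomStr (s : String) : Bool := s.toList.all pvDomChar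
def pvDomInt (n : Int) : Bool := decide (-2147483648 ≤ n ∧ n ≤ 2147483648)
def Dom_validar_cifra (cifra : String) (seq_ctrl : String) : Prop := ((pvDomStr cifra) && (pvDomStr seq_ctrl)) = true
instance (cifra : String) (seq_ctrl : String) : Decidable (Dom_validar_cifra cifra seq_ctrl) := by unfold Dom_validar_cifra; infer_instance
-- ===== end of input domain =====

-- B counts in one pass and, instead of sorting anything, selects the up-to-five leading
-- characters by repeated argmax over the distinct keys; same return value everywhere on Dom.

-- ===== PORT A =====
-- literal transliteration of A: build the filtered string, sort it, build the count dict
-- with the init-to-0 / increment pair of ifs, sort keys by count descending, compare slices.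
def validar_cifra (cifra : String) (seq_ctrl : String) : Bool :=
  let cifra_str : List Char :=
    cifra.toList.foldl (fun acc car => if car ≠ '-' then acc ++ [car] else acc) []
  let cifra_str2 := PySem.List.sorted cifra_str (fun c => c)
  let dic : PySem.Dict Char Int :=
    cifra_str2.foldl (fun d letra =>
      let d1 := if d.contains letra then d else d.insert letra 0
      if d1.contains letra then d1.insert letra (d1.getD letra 0 + 1) else d1)
      PySem.Dict.empty
  let dicL := PySem.List.sorted dic.keys (fun k => dic.getD k 0) true
  -- "".join(dicL) is the string with char list dicL; dic[0:5] == seq_ctrl[1:6] compares slices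
  if PySem.List.slice dicL (some 0) (some 5) = PySem.List.slice seq_ctrl.toList (some 1) (some 6)
  then true else false

-- ===== PORT B =====
-- the inner 'for ch, n in counts.items(): if ch not in top and (best is None or …): best = ch'
def pickStep (counts : PySem.Dict Char Int) (top : List Char)
    (best : Option Char) (p : Char × Int) : Option Char :=
  if p.1 ∈ top then best
  else
    match best with
    | none => some p.1
    | some b =>
        if counts.getD b 0 < p.2 ∨ (p.2 = counts.getD b 0 ∧ p.1 < b) then some p.1 else best

def pick (counts : PySem.Dict Char Int) (top : List Char) : Option Char :=
  counts.items.foldl (pickStep counts top) none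

-- the outer 'for _ in range(5): … if best is None: break; top.append(best)'
def selectTop (counts : PySem.Dict Char Int) : Nat → List Char → List Char
  | 0, top => top
  | fuel + 1, top =>
      match pick counts top with
      | none => top
      | some b => selectTop counts fuel (top ++ [b])

-- literal transliteration of B: one counting pass over cifra (skipping '-'), then five
-- rounds of argmax selection (higher count first, smaller char on ties); compare the join.
def validar_cifra_alt (cifra : String) (seq_ctrl : String) : Bool :=
  let counts : PySem.Dict Char Int :=
    cifra.toList.foldl (fun d c => if c ≠ '-' then d.insert c (d.getD c 0 + 1) else d)
      PySem.Dict.empty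
  let top := selectTop counts 5 []
  decide (top = PySem.List.slice seq_ctrl.toList (some 1) (some 6))

-- ===== PRECONDITION & SPEC =====
def Spec_validar_cifra (cifra : String) (seq_ctrl : String) (out : Bool) : Prop := out = validar_cifra_alt cifra seq_ctrl
instance (cifra : String) (seq_ctrl : String) (out : Bool) : Decidable (Spec_validar_cifra cifra seq_ctrl out) := by unfold Spec_validar_cifra; infer_instance

-- ===== CLAIM (what is proved, stated in full; the proofs are below) =====
def Claim_equal_validar_cifra : Prop := ∀ (cifra : String) (seq_ctrl : String), Dom_validar_cifra cifra seq_ctrl → Spec_validar_cifra cifra seq_ctrl (validar_cifra cifra seq_ctrl)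

-- ===== LEMMAS AND PROOFS =====

-- A's string-building loop is filtering.
theorem foldl_keep_ne (l acc : List Char) :
    l.foldl (fun acc car => if car ≠ '-' then acc ++ [car] else acc) acc
      = acc ++ l.filter (fun c => c ≠ '-') := by
  induction l generalizing acc with
  | nil => simp
  | cons x l ih =>
    rw [List.foldl_cons, List.filter_cons]
    by_cases h : x = '-'
    · rw [if_neg (by simp [h]), if_neg (by simp [h])]
      exact ih acc
    · rw [if_pos (by simp [h]), if_pos (by simp [h]), ih]
      simp

-- B's guarded counting loop is the counting loop over the filtered list.
theorem foldl_count_ne (l : List Char) (d : PySem.Dict Char Int) :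
    l.foldl (fun d c => if c ≠ '-' then d.insert c (d.getD c 0 + 1) else d) d
      = (l.filter (fun c => c ≠ '-')).foldl (fun d c => d.insert c (d.getD c 0 + 1)) d := by
  induction l generalizing d with
  | nil => simp
  | cons x l ih =>
    rw [List.foldl_cons, List.filter_cons]
    by_cases h : x = '-'
    · rw [if_neg (by simp [h]), if_neg (by simp [h])]
      exact ih d
    · rw [if_pos (by simp [h]), if_pos (by simp [h]), List.foldl_cons]
      exact ih _

-- One step of A's dict loop is one step of the counting loop.
theorem stepA_eq (d : PySem.Dict Char Int) (c : Char) :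
    (let d1 := if d.contains c then d else d.insert c 0
     if d1.contains c then d1.insert c (d1.getD c 0 + 1) else d1)
      = d.insert c (d.getD c 0 + 1) := by
  by_cases h : d.contains c = true
  · simp [h]
  · simp [h, PySem.Dict.contains_insert_self, PySem.Dict.getD_insert_self,
      PySem.Dict.insert_insert_self, PySem.Dict.getD_of_not_contains d (0:Int) (by simpa using h)]

-- hence A's dict over ys is Counter(ys)
theorem dicA_eq_counter (ys : List Char) :
    ys.foldl (fun d letra =>
      let d1 := if d.contains letra then d else d.insert letra 0
      if d1.contains letra then d1.insert letra (d1.getD letra 0 + 1) else d1)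
      PySem.Dict.empty = PySem.Dict.counter ys := by
  rw [← PySem.Dict.foldl_insert_getD_add_one_eq_counter]
  congr 1
  funext d c
  exact stepA_eq d c

-- set(xs) in insertion order is a sublist of xs
theorem ofList_sublist (xs : List Char) : List.Sublist (PySem.Set.ofList xs) xs := by
  induction xs with
  | nil => simp [PySem.Set.ofList, PySem.Set.empty]
  | cons x xs ih =>
    rw [PySem.Set.ofList_cons]
    refine List.Sublist.cons₂ x (List.Sublist.trans ?_ ih)
    simp only [PySem.Set.discard]
    exact List.filter_sublist

-- the distinct elements of the sorted list, in order = the distinct elements, sorted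
theorem ofList_sorted_eq (xs : List Char) :
    PySem.List.sorted (PySem.Set.ofList xs) (fun k => k)
      = PySem.Set.ofList (PySem.List.sorted xs (fun c => c)) := by
  apply PySem.List.sorted_eq_of_perm_of_pairwise_lt
  · refine (List.perm_ext_iff_of_nodup (PySem.Set.nodup_ofList _) (PySem.Set.nodup_ofList _)).mpr ?_
    intro a
    simp [PySem.Set.mem_ofList, (PySem.List.sorted_perm xs (fun c => c) false).mem_iff]
  · have hle : List.Pairwise (fun a b : Char => a ≤ b)
        (PySem.Set.ofList (PySem.List.sorted xs (fun c => c))) :=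
      List.Pairwise.sublist (ofList_sublist _) (PySem.List.sorted_pairwise xs (fun c => c))
    have hne : List.Pairwise (fun a b : Char => a ≠ b)
        (PySem.Set.ofList (PySem.List.sorted xs (fun c => c))) :=
      PySem.Set.nodup_ofList _
    exact (hle.and hne).imp (fun h => lt_of_le_of_ne h.1 h.2)

-- ---------- the combined ranking key ----------

-- Python's char order in terms of codepoints.
theorem char_lt_iff (a b : Char) : a < b ↔ a.toNat < b.toNat := by
  rw [Char.lt_def, UInt32.lt_iff_toNat_lt]
  exact Iff.rfl

-- K packs (count desc, char asc) into one Int key, exact for codepoints ≤ 126.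
def pvK (cnt : Char → Int) (k : Char) : Int := 128 * cnt k - (k.toNat : Int)

theorem pvK_lt_iff (cnt : Char → Int) (a b : Char)
    (ha : a.toNat ≤ 126) (hb : b.toNat ≤ 126) :
    pvK cnt b < pvK cnt a ↔ (cnt b < cnt a ∨ (cnt a = cnt b ∧ a < b)) := by
  have ha' : (a.toNat : Int) ≤ 126 := by exact_mod_cast ha
  have hb' : (b.toNat : Int) ≤ 126 := by exact_mod_cast hb
  have ha0 : (0 : Int) ≤ (a.toNat : Int) := by positivity
  have hb0 : (0 : Int) ≤ (b.toNat : Int) := by positivity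
  rw [char_lt_iff]
  unfold pvK
  constructor
  · intro h
    by_cases hc : cnt b < cnt a
    · exact Or.inl hc
    · right
      constructor
      · omega
      · have : (a.toNat : Int) < (b.toNat : Int) := by omega
        exact_mod_cast this
  · intro h
    rcases h with h | ⟨h1, h2⟩
    · omega
    · have : (a.toNat : Int) < (b.toNat : Int) := by exact_mod_cast h2
      omega

-- ---------- A's stable reverse sort over an increasing key list = sort by K ----------

theorem insertBy_tie (cnt : Char → Int) (x : Char) (acc : List Char)
    (hx : x.toNat ≤ 126) (hacc : ∀ y ∈ acc, y < x ∧ y.toNat ≤ 126) :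
    PySem.List.insertBy (fun a b => decide (cnt b < cnt a)) x acc
      = PySem.List.insertBy (fun a b => decide (pvK cnt b < pvK cnt a)) x acc := by
  induction acc with
  | nil => rfl
  | cons y ys ih =>
    have hy := hacc y (by simp)
    have hyx : y.toNat < x.toNat := (char_lt_iff y x).mp hy.1
    have hiff : (cnt y < cnt x) ↔ (pvK cnt y < pvK cnt x) := by
      rw [pvK_lt_iff cnt x y hx hy.2]
      constructor
      · exact Or.inl
      · rintro (h | ⟨h1, h2⟩)
        · exact h
        · exact absurd ((char_lt_iff x y).mp h2) (by omega)
    simp only [PySem.List.insertBy]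
    by_cases h : cnt y < cnt x
    · rw [if_pos (by simpa using h), if_pos (by simpa using hiff.mp h)]
    · rw [if_neg (by simpa using h), if_neg (by simpa using fun hk => h (hiff.mpr hk))]
      rw [ih (fun z hz => hacc z (by simp [hz]))]

theorem sorted_rev_stable_eq_K (cnt : Char → Int) (S : List Char)
    (hS : S.Pairwise (· < ·)) (hdom : ∀ y ∈ S, y.toNat ≤ 126) :
    PySem.List.sorted S cnt true = PySem.List.sorted S (pvK cnt) true := by
  rw [PySem.List.sorted_rev_eq_foldl_insertBy, PySem.List.sorted_rev_eq_foldl_insertBy]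
  have main : ∀ (l : List Char) (acc : List Char),
      l.Pairwise (· < ·) → (∀ y ∈ l, y.toNat ≤ 126) →
      (∀ y ∈ acc, (∀ x ∈ l, y < x) ∧ y.toNat ≤ 126) →
      List.foldl (fun acc x => PySem.List.insertBy (fun a b => decide (cnt b < cnt a)) x acc) acc l
        = List.foldl (fun acc x => PySem.List.insertBy (fun a b => decide (pvK cnt b < pvK cnt a)) x acc) acc l := by
    intro l
    induction l with
    | nil => intro acc _ _ _; rfl
    | cons x xs ih =>
      intro acc hp hd hacc
      simp only [List.foldl_cons]
      rw [insertBy_tie cnt x acc (hd x (by simp))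
        (fun y hy => ⟨(hacc y hy).1 x (by simp), (hacc y hy).2⟩)]
      apply ih _ (List.pairwise_cons.mp hp).2 (fun y hy => hd y (by simp [hy]))
      intro y hy
      rcases (PySem.List.mem_insertBy _ _ _ _).mp hy with h | h
      · subst h
        exact ⟨fun z hz => (List.pairwise_cons.mp hp).1 z hz, hd y (by simp)⟩
      · exact ⟨fun z hz => (hacc y h).1 z (by simp [hz]), (hacc y h).2⟩
  exact main S [] hS hdom (by simp)

-- ---------- the selection loop picks the K-maximum of the unchosen keys ----------

-- the fold keeps its accumulator when every key is already chosen
theorem pick_all_chosen (d : PySem.Dict Char Int) (top : List Char)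
    (ps : List (Char × Int)) (acc : Option Char)
    (h : ∀ p ∈ ps, p.1 ∈ top) : ps.foldl (pickStep d top) acc = acc := by
  induction ps generalizing acc with
  | nil => rfl
  | cons p ps ih =>
    rw [List.foldl_cons]
    have : pickStep d top acc p = acc := by
      unfold pickStep
      rw [if_pos (h p (by simp))]
    rw [this]
    exact ih _ (fun q hq => h q (by simp [hq]))

-- the fold's result dominates (under K) every unchosen key it scanned and its accumulator
theorem pick_go (d : PySem.Dict Char Int) (top : List Char) (cnt : Char → Int)
    (hcnt : ∀ k, d.getD k 0 = cnt k) :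
    ∀ (ps : List (Char × Int)) (acc : Option Char),
    (∀ p ∈ ps, p.2 = cnt p.1) → (∀ p ∈ ps, p.1.toNat ≤ 126) →
    (∀ a, acc = some a → a.toNat ≤ 126) →
    ((∀ p ∈ ps, p.1 ∉ top → ∃ b, ps.foldl (pickStep d top) acc = some b ∧
        (b = p.1 ∨ pvK cnt p.1 < pvK cnt b)) ∧
     (∀ a, acc = some a → ∃ b, ps.foldl (pickStep d top) acc = some b ∧
        (b = a ∨ pvK cnt a < pvK cnt b)) ∧
     (∀ b, ps.foldl (pickStep d top) acc = some b →
        (acc = some b ∨ (b ∉ top ∧ b ∈ ps.map Prod.fst)) ∧ b.toNat ≤ 126)) := by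
  intro ps
  induction ps with
  | nil =>
    intro acc _ _ haccd
    refine ⟨by simp, ?_, ?_⟩
    · intro a ha; exact ⟨a, ha, Or.inl rfl⟩
    · intro b hb; exact ⟨Or.inl hb, haccd b hb⟩
  | cons p ps ih =>
    intro acc hv hd haccd
    have hvp : p.2 = cnt p.1 := hv p (by simp)
    have hdp : p.1.toNat ≤ 126 := hd p (by simp)
    have hv' : ∀ q ∈ ps, q.2 = cnt q.1 := fun q hq => hv q (by simp [hq])
    have hd' : ∀ q ∈ ps, q.1.toNat ≤ 126 := fun q hq => hd q (by simp [hq])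
    -- the new accumulator
    set acc' := pickStep d top acc p with hacc'
    have haccd' : ∀ a, acc' = some a → a.toNat ≤ 126 := by
      intro a ha
      rw [hacc'] at ha
      unfold pickStep at ha
      by_cases ht : p.1 ∈ top
      · rw [if_pos ht] at ha; exact haccd a ha
      · rw [if_neg ht] at ha
        cases hc : acc with
        | none =>
          rw [hc] at ha
          simp only [Option.some.injEq] at ha
          exact ha ▸ hdp
        | some b =>
          rw [hc] at ha
          simp only at ha
          split at ha
          · simp only [Option.some.injEq] at ha
            exact ha ▸ hdp
          · exact haccd a (by rw [hc, ha])
    obtain ⟨ih1, ih2, ih3⟩ := ih acc' hv' hd' haccd'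
    have hfold : (p :: ps).foldl (pickStep d top) acc = ps.foldl (pickStep d top) acc' := by
      rw [List.foldl_cons]
    -- acc' dominates acc
    have hacc'_dom : ∀ a, acc = some a → acc' = some a ∨ (acc' = some p.1 ∧ pvK cnt a < pvK cnt p.1) := by
      intro a ha
      unfold pickStep at hacc'
      by_cases ht : p.1 ∈ top
      · left; rw [hacc', if_pos ht, ha]
      · rw [ha] at hacc'
        rw [if_neg ht] at hacc'
        simp only at hacc'
        by_cases hcond : cnt a < cnt p.1 ∨ (cnt p.1 = cnt a ∧ p.1 < a)
        · right
          constructor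
          · rw [hacc']
            rw [if_pos (by rw [hcnt a, hvp]; exact hcond)]
          · have ha126 := haccd a ha
            rw [pvK_lt_iff cnt p.1 a hdp ha126]
            rcases hcond with h | ⟨h1, h2⟩
            · exact Or.inl h
            · exact Or.inr ⟨h1, h2⟩
        · left
          rw [hacc']
          rw [if_neg (by rw [hcnt a, hvp]; exact hcond)]
    refine ⟨?_, ?_, ?_⟩
    · -- every unchosen scanned key is dominated
      intro q hq hqt
      rcases List.mem_cons.mp hq with hq | hq
      · -- q is p itself
        subst hq
        -- acc' is some a' dominating p.1 (or equal)
        have : ∃ a', acc' = some a' ∧ (a' = q.1 ∨ pvK cnt q.1 < pvK cnt a') := by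
          unfold pickStep at hacc'
          rw [if_neg hqt] at hacc'
          cases hc : acc with
          | none => rw [hc] at hacc'; exact ⟨q.1, by rw [hacc'], Or.inl rfl⟩
          | some b =>
            rw [hc] at hacc'
            simp only at hacc'
            by_cases hcond : cnt b < cnt q.1 ∨ (cnt q.1 = cnt b ∧ q.1 < b)
            · refine ⟨q.1, ?_, Or.inl rfl⟩
              rw [hacc', if_pos (by rw [hcnt b, hvp]; exact hcond)]
            · refine ⟨b, ?_, ?_⟩
              · rw [hacc', if_neg (by rw [hcnt b, hvp]; exact hcond)]
              · by_cases heq : q.1 = b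
                · exact Or.inl heq.symm
                · right
                  have hb126 := haccd b hc
                  rw [pvK_lt_iff cnt b q.1 hb126 hdp]
                  rcases lt_trichotomy (cnt q.1) (cnt b) with h | h | h
                  · exact Or.inl h
                  · right
                    refine ⟨h.symm, ?_⟩
                    rw [char_lt_iff]
                    have hle : ¬ q.1 < b := fun hlt => hcond (Or.inr ⟨h, hlt⟩)
                    rw [char_lt_iff] at hle
                    have hne : q.1.toNat ≠ b.toNat :=
                      fun hc2 => heq (Char.ext (UInt32.toNat_inj.mp hc2))
                    omega
                  · exact absurd (Or.inl h) hcond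
        obtain ⟨a', ha', hdom⟩ := this
        obtain ⟨b, hb, hdb⟩ := ih2 a' ha'
        refine ⟨b, by rw [hfold]; exact hb, ?_⟩
        rcases hdom with h | h
        · subst h; exact hdb
        · rcases hdb with h2 | h2
          · subst h2; exact Or.inr h
          · exact Or.inr (lt_trans h h2)
      · obtain ⟨b, hb, hdb⟩ := ih1 q hq hqt
        exact ⟨b, by rw [hfold]; exact hb, hdb⟩
    · -- the old accumulator is dominated
      intro a ha
      rcases hacc'_dom a ha with h | ⟨h, hlt⟩
      · obtain ⟨b, hb, hdb⟩ := ih2 a h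
        exact ⟨b, by rw [hfold]; exact hb, hdb⟩
      · obtain ⟨b, hb, hdb⟩ := ih2 p.1 h
        refine ⟨b, by rw [hfold]; exact hb, ?_⟩
        rcases hdb with h2 | h2
        · subst h2; exact Or.inr hlt
        · exact Or.inr (lt_trans hlt h2)
    · -- provenance of the result
      intro b hb
      rw [hfold] at hb
      obtain ⟨hsrc, h126⟩ := ih3 b hb
      refine ⟨?_, h126⟩
      rcases hsrc with hsrc | hsrc
      · -- came from acc'
        rw [hacc'] at hsrc
        unfold pickStep at hsrc
        by_cases ht : p.1 ∈ top
        · rw [if_pos ht] at hsrc; exact Or.inl hsrc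
        · rw [if_neg ht] at hsrc
          cases hc : acc with
          | none =>
            rw [hc] at hsrc
            simp only [Option.some.injEq] at hsrc
            right
            exact ⟨hsrc ▸ ht, by simp [← hsrc]⟩
          | some a =>
            rw [hc] at hsrc
            simp only at hsrc
            split at hsrc
            · simp only [Option.some.injEq] at hsrc
              right
              exact ⟨hsrc ▸ ht, by simp [← hsrc]⟩
            · exact Or.inl hsrc
      · exact Or.inr ⟨hsrc.1, by simp [hsrc.2]⟩

-- pick over a dict whose keys are (a permutation of) L, with chosen = L.take i,
-- returns none when L.drop i = [] and the head of L.drop i otherwise.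
theorem pick_spec (d : PySem.Dict Char Int) (cnt : Char → Int) (L : List Char) (i : Nat)
    (hcnt : ∀ k, d.getD k 0 = cnt k)
    (hnodupK : d.keys.Nodup)
    (hperm : d.keys.Perm L)
    (hpair : L.Pairwise (fun a b => pvK cnt b < pvK cnt a))
    (hdomL : ∀ y ∈ L, y.toNat ≤ 126) :
    pick d (L.take i) = (L.drop i).head? := by
  have hnodupL : L.Nodup := hpair.imp (fun h => by intro he; subst he; exact lt_irrefl _ h)
  have hitems : d.items = d.keys.map (fun k => (k, d.getD k 0)) :=
    PySem.Dict.items_eq_map_keys d hnodupK 0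
  have hv : ∀ p ∈ d.items, p.2 = cnt p.1 := by
    intro p hp
    rw [hitems] at hp
    obtain ⟨k, _, hk⟩ := List.mem_map.mp hp
    rw [← hk]; exact hcnt k
  have hd126 : ∀ p ∈ d.items, p.1.toNat ≤ 126 := by
    intro p hp
    rw [hitems] at hp
    obtain ⟨k, hkmem, hk⟩ := List.mem_map.mp hp
    rw [← hk]
    exact hdomL k (hperm.mem_iff.mp hkmem)
  cases hdrop : L.drop i with
  | nil =>
    -- every key is chosen
    have hall : ∀ p ∈ d.items, p.1 ∈ L.take i := by
      intro p hp
      rw [hitems] at hp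
      obtain ⟨k, hkmem, hk⟩ := List.mem_map.mp hp
      have : k ∈ L := hperm.mem_iff.mp hkmem
      rw [← List.take_append_drop i L, hdrop] at this
      simpa [← hk] using this
    unfold pick
    rw [pick_all_chosen d (L.take i) d.items none hall]
    simp
  | cons h t =>
    obtain ⟨h1, h2, h3⟩ := pick_go d (L.take i) cnt hcnt d.items none hv hd126 (by simp)
    have hhL : h ∈ L := by
      rw [← List.take_append_drop i L, hdrop]; simp
    have hhtop : h ∉ L.take i := by
      intro hmem
      have hsplit : (L.take i ++ L.drop i).Nodup := by
        rw [List.take_append_drop]; exact hnodupL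
      obtain ⟨-, -, hdisj⟩ := List.nodup_append.mp hsplit
      exact hdisj h hmem h (by rw [hdrop]; simp) rfl
    have hhitems : (h, d.getD h 0) ∈ d.items := by
      rw [hitems]
      exact List.mem_map.mpr ⟨h, hperm.mem_iff.mpr hhL, rfl⟩
    obtain ⟨b, hb, hdb⟩ := h1 (h, d.getD h 0) hhitems hhtop
    have hbprov := (h3 b hb).1
    rcases hbprov with habs | ⟨hbtop, hbkeys⟩
    · exact absurd habs (by simp)
    have hbL : b ∈ L := by
      obtain ⟨p, hp, hpb⟩ := List.mem_map.mp hbkeys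
      subst hpb
      rw [hitems] at hp
      obtain ⟨k, hkmem, hk⟩ := List.mem_map.mp hp
      have : k = p.1 := by rw [← hk]
      exact this ▸ hperm.mem_iff.mp hkmem
    have hbdrop : b ∈ L.drop i := by
      rcases List.mem_append.mp (by rw [List.take_append_drop]; exact hbL :
          b ∈ L.take i ++ L.drop i) with h' | h'
      · exact absurd h' hbtop
      · exact h'
    have hdb' : b = h ∨ pvK cnt h < pvK cnt b := hdb
    have hbh : b = h := by
      rcases hdb' with he | hlt
      · exact he
      · -- b strictly dominates h, but h heads the drop and dominates its tail
        rw [hdrop] at hbdrop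
        rcases List.mem_cons.mp hbdrop with he | hbt
        · exact he
        · have hpd : (L.drop i).Pairwise (fun a b => pvK cnt b < pvK cnt a) :=
            hpair.sublist (List.drop_sublist i L)
          rw [hdrop] at hpd
          have := (List.pairwise_cons.mp hpd).1 b hbt
          exact absurd hlt (by omega)
    unfold pick
    rw [hbh] at hb
    rw [hb]
    rfl

-- the selection loop reads off L from position i
theorem selectTop_take (d : PySem.Dict Char Int) (cnt : Char → Int) (L : List Char)
    (hcnt : ∀ k, d.getD k 0 = cnt k)
    (hnodupK : d.keys.Nodup)
    (hperm : d.keys.Perm L)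
    (hpair : L.Pairwise (fun a b => pvK cnt b < pvK cnt a))
    (hdomL : ∀ y ∈ L, y.toNat ≤ 126) :
    ∀ (fuel i : Nat), selectTop d fuel (L.take i) = L.take (i + fuel) := by
  intro fuel
  induction fuel with
  | zero => intro i; rfl
  | succ n ih =>
    intro i
    unfold selectTop
    rw [pick_spec d cnt L i hcnt hnodupK hperm hpair hdomL]
    cases hdrop : L.drop i with
    | nil =>
      have hlen : L.length ≤ i := by
        have := congrArg List.length hdrop
        simp at this
        omega
      simp only [List.head?]
      rw [List.take_of_length_le hlen, List.take_of_length_le (by omega)]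
    | cons h t =>
      simp only [List.head?]
      have hgetElem : L.take i ++ [h] = L.take (i + 1) := by
        have hL : L[i]? = some h := by
          rw [← List.head?_drop, hdrop]; rfl
        rw [List.take_add_one, hL]
        rfl
      rw [hgetElem, ih (i + 1)]
      congr 1
      omega

-- codepoint bound coming from the input domain
theorem domChar_le (c : Char) (h : pvDomChar c = true) : c.toNat ≤ 126 := by
  simp [pvDomChar] at h
  omega

-- ===== VERDICT (by name: the statement is the Claim_ definition above) =====
theorem validar_cifra_spec : Claim_equal_validar_cifra := by
  intro cifra seq_ctrl hdom
  unfold Spec_validar_cifra validar_cifra validar_cifra_alt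
  simp only [foldl_keep_ne, foldl_count_ne, List.nil_append, dicA_eq_counter,
    PySem.Dict.foldl_insert_getD_add_one_eq_counter, PySem.Dict.keys_counter]
  set F : List Char := cifra.toList.filter (fun c => c ≠ '-') with hF
  set cnt : Char → Int := fun k => ((F.count k : Nat) : Int) with hcntdef
  -- both key functions count occurrences in F
  have hcntA : (fun k => (PySem.Dict.counter (PySem.List.sorted F (fun c => c))).getD k 0)
      = cnt := by
    funext k
    rw [PySem.Dict.getD_counter]
    exact congrArg _ ((PySem.List.sorted_perm F (fun c => c) false).count_eq k)
  have hcntB : ∀ k, (PySem.Dict.counter F).getD k 0 = cnt k := by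
    intro k
    rw [PySem.Dict.getD_counter]
  rw [hcntA]
  -- the alphabetical key list and its properties
  have hSrw : PySem.Set.ofList (PySem.List.sorted F (fun c => c))
      = PySem.List.sorted (PySem.Set.ofList F) (fun k => k) := (ofList_sorted_eq F).symm
  rw [hSrw]
  set S : List Char := PySem.List.sorted (PySem.Set.ofList F) (fun k => k) with hSdef
  have hSpair : S.Pairwise (· < ·) := PySem.List.sorted_ofList_pairwise_lt F
  have hdomF : ∀ y ∈ F, y.toNat ≤ 126 := by
    intro y hy
    have hyc : y ∈ cifra.toList := List.mem_of_mem_filter hy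
    have : pvDomChar y = true := by
      unfold Dom_validar_cifra pvDomStr at hdom
      simp only [Bool.and_eq_true, List.all_eq_true] at hdom
      exact hdom.1 y hyc
    exact domChar_le y this
  have hSdom : ∀ y ∈ S, y.toNat ≤ 126 := by
    intro y hy
    have : y ∈ PySem.Set.ofList F :=
      (PySem.List.sorted_perm (PySem.Set.ofList F) (fun k => k) false).mem_iff.mp hy
    exact hdomF y ((PySem.Set.mem_ofList F y).mp this)
  -- A's stable reverse sort is the sort by the packed key
  rw [sorted_rev_stable_eq_K cnt S hSpair hSdom]
  set L : List Char := PySem.List.sorted S (pvK cnt) true with hLdef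
  -- properties of L
  have hLperm : L.Perm S := PySem.List.sorted_perm S (pvK cnt) true
  have hLdom : ∀ y ∈ L, y.toNat ≤ 126 := fun y hy => hSdom y (hLperm.mem_iff.mp hy)
  have hLnodup : L.Nodup := hLperm.nodup_iff.mpr (hSpair.imp ne_of_lt)
  have hLpair : L.Pairwise (fun a b => pvK cnt b < pvK cnt a) := by
    have hle : L.Pairwise (fun a b => pvK cnt b ≤ pvK cnt a) :=
      PySem.List.sorted_pairwise_rev S (pvK cnt)
    refine (hle.and hLnodup).imp_of_mem ?_
    intro a b ha hb h
    rcases lt_or_eq_of_le h.1 with hlt | heq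
    · exact hlt
    · exfalso
      apply h.2
      have ha' : (a.toNat : Int) ≤ 126 := by exact_mod_cast hLdom a ha
      have hb' : (b.toNat : Int) ≤ 126 := by exact_mod_cast hLdom b hb
      have ha0 : (0 : Int) ≤ (a.toNat : Int) := by positivity
      have hb0 : (0 : Int) ≤ (b.toNat : Int) := by positivity
      have : (a.toNat : Int) = (b.toNat : Int) := by
        unfold pvK at heq
        omega
      exact Char.ext (UInt32.toNat_inj.mp (by exact_mod_cast this))
  -- B's selection loop reads off the first five entries of L
  have hkeysnodup : (PySem.Dict.counter F).keys.Nodup := PySem.Dict.nodup_keys_counter F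
  have hkeysperm : (PySem.Dict.counter F).keys.Perm L := by
    rw [PySem.Dict.keys_counter]
    exact (hLperm.trans (PySem.List.sorted_perm (PySem.Set.ofList F) (fun k => k) false)).symm
  have hsel : selectTop (PySem.Dict.counter F) 5 [] = L.take 5 := by
    have := selectTop_take (PySem.Dict.counter F) cnt L hcntB hkeysnodup hkeysperm hLpair hLdom 5 0
    simpa using this
  rw [hsel]
  -- both sides compare the same five characters with the same control slice
  rw [PySem.List.slice_zero_start, PySem.List.slice_to L (by norm_num : (0:Int) ≤ 5)]
  norm_num
  rw [show ((5 : Int)).toNat = 5 from rfl]
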